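-- pv_equiv track=rewrite | github.com/adam-rumpf/english-words | word_rules.py | character_types
-- ===== SOURCE A (Python) =====
-- CONSONANTS = "bcdfghjklmnpqrstvwxyz"
--
-- VOWELS = "aeiou"
--
-- def character_types(w, vowel=False):
--     """character_types(w[, vowel]) -> bool
--     Determines whether a string contains any consonants or vowels.
--
--     Positional arguments:
--     w (str) -- input string to categorize
--
--     Keyword arguments:
--     [vowel=False] (bool) -- False to check for the presence of consonants, True
--         to check for the presence of vowels
--
--     Returns:
--     (bool) -- True if the specified character type is present, False otherwise
--     """
--
--     # Process each letter of the input word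
--     for c in w:
--         if vowel == False:
--             if c in CONSONANTS:
--                 return True
--         else:
--             if c in VOWELS:
--                 return True
--
--     # If the character type was not found, return False
--     return False
-- ===== SOURCE B (Python) =====
-- CONSONANTS = "bcdfghjklmnpqrstvwxyz"
--
-- VOWELS = "aeiou"
--
-- def character_types(w, vowel=False):
--     """Reversed traversal: instead of scanning the word and testing each
--     character against the letter set, iterate over the (small, fixed)
--     letter set and test whether each letter occurs anywhere in the word."""
--     letters = CONSONANTS if vowel == False else VOWELS
--     for letter in letters:
--         if letter in w:
--             return True
--     return False
-- ===== Notes on version B (the rewrite author's own statement) =====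
-- stated objective: alternative
-- what changed: Swaps the loops: A scans the word once testing each character against the letter string, B iterates over the fixed letter alphabet and tests each letter for occurrence anywhere in the word (substring search), so the word is scanned per letter rather than the letters per character.
import Mathlib
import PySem

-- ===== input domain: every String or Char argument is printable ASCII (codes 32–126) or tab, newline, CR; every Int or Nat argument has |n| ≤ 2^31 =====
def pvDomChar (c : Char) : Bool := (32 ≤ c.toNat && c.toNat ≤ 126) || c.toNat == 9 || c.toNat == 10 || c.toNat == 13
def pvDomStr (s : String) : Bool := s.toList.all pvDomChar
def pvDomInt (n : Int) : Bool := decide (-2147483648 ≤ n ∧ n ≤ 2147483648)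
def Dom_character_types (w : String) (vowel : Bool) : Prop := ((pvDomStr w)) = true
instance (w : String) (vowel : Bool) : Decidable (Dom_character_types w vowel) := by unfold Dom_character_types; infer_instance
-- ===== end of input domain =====

-- B swaps the loops: it iterates over the fixed letter alphabet and tests each letter for occurrence in the word (objective: alternative).
-- ===== PORT A =====
def pvCONSONANTS : String := "bcdfghjklmnpqrstvwxyz"
def pvVOWELS : String := "aeiou"

-- A's for-loop over the word with early return, as structural recursion over the characters
def ctLoopA (vowel : Bool) : List Char → Bool
  | [] => false
  | c :: cs =>
    if vowel == false then
      if pvCONSONANTS.toList.contains c then true else ctLoopA vowel cs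
    else
      if pvVOWELS.toList.contains c then true else ctLoopA vowel cs

def character_types (w : String) (vowel : Bool) : Bool := ctLoopA vowel w.toList

-- ===== PORT B =====
-- B's for-loop over the letter alphabet with early return; `letter in w` is char-in-string membership
def ctLoopB (w : List Char) : List Char → Bool
  | [] => false
  | l :: ls => if w.contains l then true else ctLoopB w ls

def character_types_alt (w : String) (vowel : Bool) : Bool :=
  let letters := if vowel == false then pvCONSONANTS else pvVOWELS
  ctLoopB w.toList letters.toList

-- ===== PRECONDITION & SPEC =====
def Spec_character_types (w : String) (vowel : Bool) (out : Bool) : Prop := out = character_types_alt w vowel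
instance (w : String) (vowel : Bool) (out : Bool) : Decidable (Spec_character_types w vowel out) := by unfold Spec_character_types; infer_instance

-- ===== CLAIM =====
def Claim_equal_character_types : Prop := ∀ (w : String) (vowel : Bool), Dom_character_types w vowel → Spec_character_types w vowel (character_types w vowel)

-- ===== LEMMAS AND PROOFS =====
theorem ctLoopA_eq_any (vowel : Bool) (l : List Char) :
    ctLoopA vowel l = l.any (fun c =>
      (if vowel == false then pvCONSONANTS else pvVOWELS).toList.contains c) := by
  induction l with
  | nil => rfl
  | cons c cs ih =>
    simp only [ctLoopA, List.any_cons]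
    cases vowel <;> simp [ih]

theorem ctLoopB_eq_any (w : List Char) (ls : List Char) :
    ctLoopB w ls = ls.any (fun l => w.contains l) := by
  induction ls with
  | nil => rfl
  | cons l ls ih => simp [ctLoopB, ih]

-- ===== VERDICT =====
theorem character_types_spec : Claim_equal_character_types := by
  intro w vowel _
  show character_types w vowel = character_types_alt w vowel
  rw [character_types, ctLoopA_eq_any, character_types_alt, ctLoopB_eq_any]
  apply Bool.eq_iff_iff.mpr
  simp only [List.any_eq_true, List.contains_eq_mem, decide_eq_true_eq]
  exact ⟨fun ⟨c, hc, hm⟩ => ⟨c, hm, hc⟩, fun ⟨l, hl, hm⟩ => ⟨l, hm, hl⟩⟩
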